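-- pv_equiv track=rewrite | github.com/PrMayekar/BLITZhackathon | recipes/engine.py | ingredient_match
-- ===== SOURCE A (Python) =====
-- def normalize(name: str) -> str:
--     return name.lower().strip()
--
-- def ingredient_match(user_ingredient_name: str, recipe_ingredient_name: str) -> bool:
--     u = normalize(user_ingredient_name)
--     r = normalize(recipe_ingredient_name)
--     if u == r:
--         return True
--     if u in r or r in u:
--         return True
--     # Basic synonym map
--     synonyms = {
--         'tomato': ['tomatoes', 'cherry tomato'],
--         'onion': ['onions', 'red onion', 'white onion'],
--         'garlic': ['garlic cloves', 'garlic paste'],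
--         'potato': ['potatoes', 'aloo'],
--         'chicken': ['chicken breast', 'chicken pieces', 'chicken thigh'],
--         'egg': ['eggs', 'egg whites'],
--         'milk': ['whole milk', 'dairy milk'],
--         'cheese': ['cheddar', 'paneer', 'mozzarella'],
--         'spinach': ['palak', 'baby spinach'],
--         'rice': ['basmati rice', 'white rice', 'cooked rice'],
--         'flour': ['all-purpose flour', 'maida', 'wheat flour'],
--         'oil': ['vegetable oil', 'cooking oil', 'olive oil', 'sunflower oil'],
--         'butter': ['unsalted butter', 'salted butter'],
--         'lemon': ['lemon juice', 'lime'],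
--         'ginger': ['ginger paste', 'adrak'],
--         'coriander': ['cilantro', 'dhania'],
--     }
--     for key, alts in synonyms.items():
--         all_names = [key] + alts
--         if u in all_names and r in all_names:
--             return True
--     return False
-- ===== SOURCE B (Python) =====
-- # Fuzzy-match via a flat reverse index: every synonym-table name maps to a numeric
-- # group id in one literal dict; the match is then lookup-and-compare, with no scan
-- # over groups and no per-call list building.
--
-- SYN_GROUP = {
--     'tomato': 0,
--     'tomatoes': 0,
--     'cherry tomato': 0,
--     'onion': 1,
--     'onions': 1,
--     'red onion': 1,
--     'white onion': 1,
--     'garlic': 2,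
--     'garlic cloves': 2,
--     'garlic paste': 2,
--     'potato': 3,
--     'potatoes': 3,
--     'aloo': 3,
--     'chicken': 4,
--     'chicken breast': 4,
--     'chicken pieces': 4,
--     'chicken thigh': 4,
--     'egg': 5,
--     'eggs': 5,
--     'egg whites': 5,
--     'milk': 6,
--     'whole milk': 6,
--     'dairy milk': 6,
--     'cheese': 7,
--     'cheddar': 7,
--     'paneer': 7,
--     'mozzarella': 7,
--     'spinach': 8,
--     'palak': 8,
--     'baby spinach': 8,
--     'rice': 9,
--     'basmati rice': 9,
--     'white rice': 9,
--     'cooked rice': 9,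
--     'flour': 10,
--     'all-purpose flour': 10,
--     'maida': 10,
--     'wheat flour': 10,
--     'oil': 11,
--     'vegetable oil': 11,
--     'cooking oil': 11,
--     'olive oil': 11,
--     'sunflower oil': 11,
--     'butter': 12,
--     'unsalted butter': 12,
--     'salted butter': 12,
--     'lemon': 13,
--     'lemon juice': 13,
--     'lime': 13,
--     'ginger': 14,
--     'ginger paste': 14,
--     'adrak': 14,
--     'coriander': 15,
--     'cilantro': 15,
--     'dhania': 15,
-- }
--
-- def ingredient_match(user_ingredient_name: str, recipe_ingredient_name: str) -> bool:
--     u = user_ingredient_name.lower().strip()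
--     r = recipe_ingredient_name.lower().strip()
--     if u == r or u in r or r in u:
--         return True
--     gu = SYN_GROUP.get(u)
--     return gu is not None and gu == SYN_GROUP.get(r)
-- ===== Notes on version B (the rewrite author's own statement) =====
-- stated objective: idiomatic
-- what changed: A's per-call scan over the synonym groups (building [key]+alts and testing membership of both names in each) is replaced by a module-level literal flat reverse index mapping every name to a numeric group id; the match is a single lookup-and-compare with no loop and no per-call list construction.
import Mathlib
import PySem

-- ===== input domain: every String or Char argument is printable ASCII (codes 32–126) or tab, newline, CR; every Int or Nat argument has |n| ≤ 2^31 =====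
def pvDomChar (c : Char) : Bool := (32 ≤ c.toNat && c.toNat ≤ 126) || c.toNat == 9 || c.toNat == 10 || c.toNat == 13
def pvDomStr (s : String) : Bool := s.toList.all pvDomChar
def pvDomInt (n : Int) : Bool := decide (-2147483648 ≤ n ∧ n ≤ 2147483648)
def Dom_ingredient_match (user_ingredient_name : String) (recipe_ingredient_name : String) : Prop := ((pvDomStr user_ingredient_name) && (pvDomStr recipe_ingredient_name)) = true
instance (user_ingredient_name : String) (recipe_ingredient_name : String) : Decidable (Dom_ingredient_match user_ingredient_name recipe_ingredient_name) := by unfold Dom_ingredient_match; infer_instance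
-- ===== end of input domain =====

-- B replaces A's per-call scan over the synonym groups by one literal flat reverse index
-- (name -> numeric group id) looked up and compared; objective: idiomatic.

-- ===== PORT A =====
def pvNormalize (s : String) : String := PySem.Str.strip (PySem.Str.lower s)

def pvSynonyms : List (String × List String) := [
  ("tomato", ["tomatoes", "cherry tomato"]),
  ("onion", ["onions", "red onion", "white onion"]),
  ("garlic", ["garlic cloves", "garlic paste"]),
  ("potato", ["potatoes", "aloo"]),
  ("chicken", ["chicken breast", "chicken pieces", "chicken thigh"]),
  ("egg", ["eggs", "egg whites"]),
  ("milk", ["whole milk", "dairy milk"]),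
  ("cheese", ["cheddar", "paneer", "mozzarella"]),
  ("spinach", ["palak", "baby spinach"]),
  ("rice", ["basmati rice", "white rice", "cooked rice"]),
  ("flour", ["all-purpose flour", "maida", "wheat flour"]),
  ("oil", ["vegetable oil", "cooking oil", "olive oil", "sunflower oil"]),
  ("butter", ["unsalted butter", "salted butter"]),
  ("lemon", ["lemon juice", "lime"]),
  ("ginger", ["ginger paste", "adrak"]),
  ("coriander", ["cilantro", "dhania"])]

-- A's 'for key, alts in synonyms.items(): …' loop
def pvLoop (u r : String) : List (String × List String) → Bool
  | [] => false
  | (key, alts) :: rest =>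
      let all_names := key :: alts
      if all_names.contains u && all_names.contains r then true
      else pvLoop u r rest

def ingredient_match (user_ingredient_name : String) (recipe_ingredient_name : String) : Bool :=
  let u := pvNormalize user_ingredient_name
  let r := pvNormalize recipe_ingredient_name
  if u == r then true
  else if PySem.Str.isIn u r || PySem.Str.isIn r u then true
  else pvLoop u r pvSynonyms

-- ===== PORT B =====
-- the module-level literal SYN_GROUP dict: every name -> its numeric group id
def pvSynGroup : PySem.Dict String Nat := PySem.Dict.mk [
  ("tomato", 0),
  ("tomatoes", 0),
  ("cherry tomato", 0),
  ("onion", 1),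
  ("onions", 1),
  ("red onion", 1),
  ("white onion", 1),
  ("garlic", 2),
  ("garlic cloves", 2),
  ("garlic paste", 2),
  ("potato", 3),
  ("potatoes", 3),
  ("aloo", 3),
  ("chicken", 4),
  ("chicken breast", 4),
  ("chicken pieces", 4),
  ("chicken thigh", 4),
  ("egg", 5),
  ("eggs", 5),
  ("egg whites", 5),
  ("milk", 6),
  ("whole milk", 6),
  ("dairy milk", 6),
  ("cheese", 7),
  ("cheddar", 7),
  ("paneer", 7),
  ("mozzarella", 7),
  ("spinach", 8),
  ("palak", 8),
  ("baby spinach", 8),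
  ("rice", 9),
  ("basmati rice", 9),
  ("white rice", 9),
  ("cooked rice", 9),
  ("flour", 10),
  ("all-purpose flour", 10),
  ("maida", 10),
  ("wheat flour", 10),
  ("oil", 11),
  ("vegetable oil", 11),
  ("cooking oil", 11),
  ("olive oil", 11),
  ("sunflower oil", 11),
  ("butter", 12),
  ("unsalted butter", 12),
  ("salted butter", 12),
  ("lemon", 13),
  ("lemon juice", 13),
  ("lime", 13),
  ("ginger", 14),
  ("ginger paste", 14),
  ("adrak", 14),
  ("coriander", 15),
  ("cilantro", 15),
  ("dhania", 15)]

def ingredient_match_alt (user_ingredient_name : String) (recipe_ingredient_name : String) : Bool :=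
  let u := PySem.Str.strip (PySem.Str.lower user_ingredient_name)
  let r := PySem.Str.strip (PySem.Str.lower recipe_ingredient_name)
  if u == r || PySem.Str.isIn u r || PySem.Str.isIn r u then true
  else
    -- 'gu = SYN_GROUP.get(u); return gu is not None and gu == SYN_GROUP.get(r)'
    match pvSynGroup.get? u with
    | some g => some g == pvSynGroup.get? r
    | none => false

-- ===== PRECONDITION & SPEC =====
def Spec_ingredient_match (user_ingredient_name : String) (recipe_ingredient_name : String) (out : Bool) : Prop := out = ingredient_match_alt user_ingredient_name recipe_ingredient_name
instance (user_ingredient_name : String) (recipe_ingredient_name : String) (out : Bool) : Decidable (Spec_ingredient_match user_ingredient_name recipe_ingredient_name out) := by unfold Spec_ingredient_match; infer_instance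

-- ===== CLAIM =====
def Claim_equal_ingredient_match : Prop := ∀ (user_ingredient_name : String) (recipe_ingredient_name : String), Dom_ingredient_match user_ingredient_name recipe_ingredient_name → Spec_ingredient_match user_ingredient_name recipe_ingredient_name (ingredient_match user_ingredient_name recipe_ingredient_name)

-- ===== LEMMAS AND PROOFS =====

-- indexed groups and their flattened name list
def pvIdxGroups : List ((String × List String) × Nat) := pvSynonyms.zipIdx

def pvFlat (gs : List ((String × List String) × Nat)) : List String :=
  gs.flatMap (fun p => p.1.1 :: p.1.2)

-- the index build the literal pvSynGroup corresponds to
def pvBuild (gs : List ((String × List String) × Nat)) (d : PySem.Dict String Nat) :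
    PySem.Dict String Nat :=
  gs.foldl (fun d p => (p.1.1 :: p.1.2).foldl (fun d n => d.insert n p.2) d) d

set_option maxRecDepth 20000 in
theorem pvSynGroup_eq : pvSynGroup = pvBuild pvIdxGroups PySem.Dict.empty := by decide

theorem pvBuild_cons (g : (String × List String) × Nat) (rest : List ((String × List String) × Nat))
    (d : PySem.Dict String Nat) :
    pvBuild (g :: rest) d =
      pvBuild rest ((g.1.1 :: g.1.2).foldl (fun d n => d.insert n g.2) d) := rfl

theorem pvInner_keeps (l : List String) (k : Nat) (u : String) (d : PySem.Dict String Nat)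
    (h : d.get? u = some k) :
    (l.foldl (fun d n => d.insert n k) d).get? u = some k := by
  induction l generalizing d with
  | nil => exact h
  | cons n rest ih =>
      simp only [List.foldl_cons]
      apply ih
      by_cases hn : u = n
      · subst hn; exact PySem.Dict.get?_insert_self d u k
      · rw [PySem.Dict.get?_insert_of_ne _ _ hn]; exact h

theorem pvInner_hit (l : List String) (k : Nat) (u : String) (d : PySem.Dict String Nat)
    (h : u ∈ l) :
    (l.foldl (fun d n => d.insert n k) d).get? u = some k := by
  induction l generalizing d with
  | nil => cases h
  | cons n rest ih =>
      simp only [List.foldl_cons]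
      by_cases hn : u = n
      · subst hn
        exact pvInner_keeps rest k u _ (PySem.Dict.get?_insert_self d u k)
      · exact ih _ (by cases h with | head => exact absurd rfl hn | tail _ h => exact h)

theorem pvInner_miss (l : List String) (k : Nat) (u : String) (d : PySem.Dict String Nat)
    (h : u ∉ l) :
    (l.foldl (fun d n => d.insert n k) d).get? u = d.get? u := by
  induction l generalizing d with
  | nil => rfl
  | cons n rest ih =>
      simp only [List.foldl_cons]
      rw [ih _ (fun hm => h (List.mem_cons_of_mem _ hm)),
        PySem.Dict.get?_insert_of_ne _ _ (fun he => h (by rw [he]; exact List.mem_cons_self))]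

theorem pvBuild_miss (gs : List ((String × List String) × Nat)) (u : String)
    (d : PySem.Dict String Nat) (h : u ∉ pvFlat gs) :
    (pvBuild gs d).get? u = d.get? u := by
  induction gs generalizing d with
  | nil => rfl
  | cons g rest ih =>
      simp only [pvFlat, List.flatMap_cons, List.mem_append] at h
      push Not at h
      rw [pvBuild_cons, ih _ h.2, pvInner_miss _ _ _ _ h.1]

theorem pvBuild_hit (gs : List ((String × List String) × Nat)) (u : String)
    (p : (String × List String) × Nat) (hnd : (pvFlat gs).Nodup) (hp : p ∈ gs)
    (hu : u ∈ p.1.1 :: p.1.2) (d : PySem.Dict String Nat) :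
    (pvBuild gs d).get? u = some p.2 := by
  induction gs generalizing d with
  | nil => cases hp
  | cons g rest ih =>
      simp only [pvFlat, List.flatMap_cons] at hnd
      rw [pvBuild_cons]
      cases hp with
      | head =>
          have hmiss : u ∉ pvFlat rest :=
            fun hm => (List.disjoint_of_nodup_append hnd) hu hm
          rw [pvBuild_miss rest u _ hmiss]
          exact pvInner_hit _ _ _ _ hu
      | tail _ hp' =>
          exact ih hnd.of_append_right hp' _

theorem pvUnique (gs : List ((String × List String) × Nat)) (u : String)
    (p q : (String × List String) × Nat) (hnd : (pvFlat gs).Nodup)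
    (hp : p ∈ gs) (hq : q ∈ gs) (hu : u ∈ p.1.1 :: p.1.2) (hv : u ∈ q.1.1 :: q.1.2) :
    p = q := by
  induction gs with
  | nil => cases hp
  | cons g rest ih =>
      simp only [pvFlat, List.flatMap_cons] at hnd
      have hdisj := List.disjoint_of_nodup_append hnd
      cases hp with
      | head =>
          cases hq with
          | head => rfl
          | tail _ hq' =>
              exact absurd (List.mem_flatMap.mpr ⟨q, hq', hv⟩) (fun hm => hdisj hu hm)
      | tail _ hp' =>
          cases hq with
          | head =>
              exact absurd (List.mem_flatMap.mpr ⟨p, hp', hu⟩) (fun hm => hdisj hv hm)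
          | tail _ hq' =>
              exact ih hnd.of_append_right hp' hq'

-- a group is in pvSynonyms iff it carries some index in pvIdxGroups
theorem pvMem_idx (x : String × List String) :
    x ∈ pvSynonyms ↔ ∃ i, (x, i) ∈ pvIdxGroups := by
  unfold pvIdxGroups
  constructor
  · intro h
    obtain ⟨i, hi, hx⟩ := List.mem_iff_getElem.mp h
    exact ⟨i, by simpa [hx] using List.mem_zipIdx_iff_getElem?.mpr (by simp [hx, hi])⟩
  · rintro ⟨i, hi⟩
    have := List.mem_zipIdx_iff_getElem?.mp hi
    exact List.mem_iff_getElem?.mpr ⟨i, by simpa using this⟩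

theorem pvLoop_iff (u r : String) (gs : List (String × List String)) :
    pvLoop u r gs = true ↔ ∃ p ∈ gs, u ∈ p.1 :: p.2 ∧ r ∈ p.1 :: p.2 := by
  induction gs with
  | nil => simp [pvLoop]
  | cons g rest ih =>
      obtain ⟨k, al⟩ := g
      simp only [pvLoop]
      by_cases h : ((k :: al).contains u && (k :: al).contains r) = true
      · rw [if_pos h]
        simp only [Bool.and_eq_true, List.contains_eq_mem, decide_eq_true_eq] at h
        simp only [true_iff]
        exact ⟨(k, al), List.mem_cons_self, h.1, h.2⟩
      · rw [if_neg h, ih]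
        simp only [Bool.and_eq_true, List.contains_eq_mem, decide_eq_true_eq,
          not_and_or] at h
        constructor
        · rintro ⟨p, hp, hu2, hr2⟩
          exact ⟨p, List.mem_cons_of_mem _ hp, hu2, hr2⟩
        · rintro ⟨p, hp, hu2, hr2⟩
          rcases List.mem_cons.mp hp with hpg | hp'
          · subst hpg
            rcases h with h | h
            · exact absurd hu2 h
            · exact absurd hr2 h
          · exact ⟨p, hp', hu2, hr2⟩

theorem pvLoop_iff_idx (u r : String) :
    pvLoop u r pvSynonyms = true ↔
      ∃ e ∈ pvIdxGroups, u ∈ e.1.1 :: e.1.2 ∧ r ∈ e.1.1 :: e.1.2 := by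
  rw [pvLoop_iff]
  constructor
  · rintro ⟨p, hp, hu2, hr2⟩
    obtain ⟨i, hi⟩ := (pvMem_idx p).mp hp
    exact ⟨(p, i), hi, hu2, hr2⟩
  · rintro ⟨e, he, hu2, hr2⟩
    exact ⟨e.1, (pvMem_idx e.1).mpr ⟨e.2, he⟩, hu2, hr2⟩

set_option maxRecDepth 20000 in
theorem pvNodup : (pvFlat pvIdxGroups).Nodup := by decide

theorem pvLoop_eq_index (u r : String) :
    pvLoop u r pvSynonyms =
      (match pvSynGroup.get? u with
       | some g => some g == pvSynGroup.get? r
       | none => false) := by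
  rw [pvSynGroup_eq]
  by_cases hu : ∃ p ∈ pvIdxGroups, u ∈ p.1.1 :: p.1.2
  · obtain ⟨p, hp, hup⟩ := hu
    rw [pvBuild_hit pvIdxGroups u p pvNodup hp hup]
    by_cases hr : ∃ q ∈ pvIdxGroups, r ∈ q.1.1 :: q.1.2
    · obtain ⟨q, hq, hrq⟩ := hr
      rw [pvBuild_hit pvIdxGroups r q pvNodup hq hrq]
      simp only []
      by_cases hkq : p.2 = q.2
      · have hpq : p = q := by
          -- same index means same group: otherwise pvUnique would need a shared name;
          -- instead use that zipIdx indices are distinct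
          have h1 := List.mem_zipIdx_iff_getElem?.mp hp
          have h2 := List.mem_zipIdx_iff_getElem?.mp hq
          unfold pvIdxGroups at h1 h2
          have : (pvSynonyms[p.2]? : Option _) = pvSynonyms[q.2]? := by rw [hkq]
          simp only [h1, h2] at this ⊢
          cases p; cases q
          simp_all
        rw [(pvLoop_iff_idx u r).mpr ⟨p, hp, hup, hpq ▸ hrq⟩]
        simp [hkq]
      · have hfalse : pvLoop u r pvSynonyms = false := by
          rw [Bool.eq_false_iff]
          intro h
          obtain ⟨s, hs, hus, hrs⟩ := (pvLoop_iff_idx u r).mp h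
          have h1 : s = p := pvUnique pvIdxGroups u s p pvNodup hs hp hus hup
          have h2 : s = q := pvUnique pvIdxGroups r s q pvNodup hs hq hrs hrq
          exact hkq (h1 ▸ h2 ▸ rfl)
        rw [hfalse]
        simp [hkq]
    · have hmr : r ∉ pvFlat pvIdxGroups := by
        intro hm
        obtain ⟨q, hq, hrq⟩ := List.mem_flatMap.mp hm
        exact hr ⟨q, hq, hrq⟩
      rw [pvBuild_miss pvIdxGroups r _ hmr, PySem.Dict.get?_empty]
      have hfalse : pvLoop u r pvSynonyms = false := by
        rw [Bool.eq_false_iff]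
        intro h
        obtain ⟨s, hs, _, hrs⟩ := (pvLoop_iff_idx u r).mp h
        exact hr ⟨s, hs, hrs⟩
      rw [hfalse]
      simp
  · have hmu : u ∉ pvFlat pvIdxGroups := by
      intro hm
      obtain ⟨p, hp, hup⟩ := List.mem_flatMap.mp hm
      exact hu ⟨p, hp, hup⟩
    rw [pvBuild_miss pvIdxGroups u _ hmu, PySem.Dict.get?_empty]
    have hfalse : pvLoop u r pvSynonyms = false := by
      rw [Bool.eq_false_iff]
      intro h
      obtain ⟨s, hs, hus, _⟩ := (pvLoop_iff_idx u r).mp h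
      exact hu ⟨s, hs, hus⟩
    rw [hfalse]

-- ===== VERDICT =====
theorem ingredient_match_spec : Claim_equal_ingredient_match := by
  intro user recipe _
  unfold Spec_ingredient_match
  simp only [ingredient_match, ingredient_match_alt, pvNormalize]
  by_cases h1 : (PySem.Str.strip (PySem.Str.lower user) ==
      PySem.Str.strip (PySem.Str.lower recipe)) = true
  · simp [h1]
  · simp only [h1, Bool.false_or]
    have hL := pvLoop_eq_index (PySem.Str.strip (PySem.Str.lower user))
      (PySem.Str.strip (PySem.Str.lower recipe))
    by_cases h2 : (PySem.Str.isIn (PySem.Str.strip (PySem.Str.lower user))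
        (PySem.Str.strip (PySem.Str.lower recipe)) ||
      PySem.Str.isIn (PySem.Str.strip (PySem.Str.lower recipe))
        (PySem.Str.strip (PySem.Str.lower user))) = true
    · simp only [h2, if_true, Bool.false_eq_true, if_false]
    · rw [Bool.not_eq_true] at h2
      simp only [h2, Bool.false_eq_true, if_false]
      exact hL
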